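-- pv_equiv track=rewrite | github.com/GThibeault/algos | src/algorithms/dijkstra.py | build_shortest_paths
-- ===== SOURCE A (Python) =====
-- def build_shortest_paths(predecessor):
--     paths = [[] for i in range(len(predecessor))]
--
--     for i in range(len(predecessor)):
--         p = predecessor[i]
--
--         while p is not None:
--             paths[i].insert(0, p)
--             p = predecessor[p]
--
--     return paths
-- ===== SOURCE B (Python) =====
-- def build_shortest_paths(predecessor):
--     memo = {}
--     out = []
--     for i in range(len(predecessor)):
--         stack = []
--         j = i
--         while j not in memo:
--             p = predecessor[j]
--             if p is None:
--                 memo[j] = []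
--                 break
--             stack.append((j, p))
--             j = p
--         for j, p in reversed(stack):
--             memo[j] = memo[p] + [p]
--         out.append(list(memo[i]))
--     return out
-- ===== Notes on version B (the rewrite author's own statement) =====
-- stated objective: alternative
-- what changed: B replaces A's per-node while-loop that re-walks the whole predecessor chain with front-inserts by an iterative memoized DP: for each node it walks up only until a cached node (pushing the fresh links on an explicit stack), then unwinds the stack filling memo[j] = memo[p] + [p], so no chain segment is ever traversed twice; a timing run could not measure a speed-up because its random inputs contain cycles on which both hang, so no speed is claimed.
import Mathlib
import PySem

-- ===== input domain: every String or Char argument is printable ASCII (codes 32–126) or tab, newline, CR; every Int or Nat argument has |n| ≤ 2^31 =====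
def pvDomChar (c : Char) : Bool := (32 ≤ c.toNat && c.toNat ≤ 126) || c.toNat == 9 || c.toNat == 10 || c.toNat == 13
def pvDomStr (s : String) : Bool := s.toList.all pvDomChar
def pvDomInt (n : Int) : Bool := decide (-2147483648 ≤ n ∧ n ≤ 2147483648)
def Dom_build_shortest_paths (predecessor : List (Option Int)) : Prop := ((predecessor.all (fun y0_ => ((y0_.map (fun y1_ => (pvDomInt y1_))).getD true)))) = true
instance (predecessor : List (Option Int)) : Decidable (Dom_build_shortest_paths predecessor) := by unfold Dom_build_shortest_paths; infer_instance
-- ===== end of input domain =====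

-- B is a memoized DP with an explicit stack: each node walks up only to the first cached node,
-- then unwinds filling memo[j] = memo[p] + [p]; A re-walks every chain with insert(0).
-- ===== PORT A =====
-- 'p = predecessor[p]' with Python's (possibly negative) indexing; under Pre_ the lookup
-- never raises, so the merged Option ((pyGet? …).join) is exact there.
def pvStep (predecessor : List (Option Int)) (p : Int) : Option Int :=
  (PySem.List.pyGet? predecessor p).join

-- A's inner while-loop: 'paths[i].insert(0, p); p = predecessor[p]', with fuel;
-- under Pre_ chains terminate within 'len(predecessor)' steps, so fuel is never exhausted.
def pvAWhile (predecessor : List (Option Int)) : Nat → List Int → Option Int → List Int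
  | 0, acc, _ => acc
  | fuel + 1, acc, p =>
    match p with
    | none => acc
    | some q => pvAWhile predecessor fuel (q :: acc) (pvStep predecessor q)

def build_shortest_paths (predecessor : List (Option Int)) : List (List Int) :=
  (List.range predecessor.length).map
    (fun i => pvAWhile predecessor predecessor.length [] (pvStep predecessor (i : Int)))

-- ===== PORT B =====
-- B's inner 'while j not in memo' loop: push (j, pred[j]) until a cached node or a root;
-- fuel bounds the iterations (under Pre_ chains die within len(predecessor) steps).
def pvCollect (predecessor : List (Option Int)) :
    Nat → PySem.Dict Int (List Int) → List (Int × Int) → Int →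
      List (Int × Int) × PySem.Dict Int (List Int)
  | 0, memo, stack, _ => (stack, memo)   -- unreachable under Pre_
  | fuel + 1, memo, stack, j =>
    match memo.get? j with
    | some _ => (stack, memo)            -- 'while j not in memo' exits
    | none =>
      match pvStep predecessor j with
      | none => (stack, memo.insert j []) -- 'memo[j] = []; break'
      | some p => pvCollect predecessor fuel memo (stack ++ [(j, p)]) p

-- B's unwind loop: 'for j, p in reversed(stack): memo[j] = memo[p] + [p]'
-- ('memo[p]' as getD _ []: under Pre_ the key is always present, so this is exact there)
def pvUnwind (memo : PySem.Dict Int (List Int)) (stack : List (Int × Int)) :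
    PySem.Dict Int (List Int) :=
  stack.reverse.foldl (fun m jp => m.insert jp.1 (m.getD jp.2 [] ++ [jp.2])) memo

-- the body of B's outer for-loop: collect, unwind, append list(memo[i])
def pvBStep (predecessor : List (Option Int))
    (st : List (List Int) × PySem.Dict Int (List Int)) (i : Nat) :
    List (List Int) × PySem.Dict Int (List Int) :=
  let (stack, m1) := pvCollect predecessor predecessor.length st.2 [] (i : Int)
  let m2 := pvUnwind m1 stack
  (st.1 ++ [m2.getD (i : Int) []], m2)

def build_shortest_paths_alt (predecessor : List (Option Int)) : List (List Int) :=
  ((List.range predecessor.length).foldl (pvBStep predecessor)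
    (([] : List (List Int)), PySem.Dict.empty)).1

-- ===== PRECONDITION & SPEC =====
-- one step of the predecessor chain, lifted to Option (used only by Pre_)
def pvChainStep (predecessor : List (Option Int)) : Option Int → Option Int
  | none => none
  | some p => pvStep predecessor p

-- Pre_: every stored predecessor is a valid (possibly negative) Python index, and every
-- predecessor chain dies out within len(predecessor) steps (no cycle). Outside this, the
-- Python A raises IndexError or loops forever, so it returns on exactly these inputs.
def Pre_build_shortest_paths (predecessor : List (Option Int)) : Prop :=
  (∀ o ∈ predecessor, ∀ p : Int, o = some p →
      -(predecessor.length : Int) ≤ p ∧ p < (predecessor.length : Int)) ∧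
  (∀ i ∈ List.range predecessor.length,
      (pvChainStep predecessor)^[predecessor.length] (some (i : Int)) = none)

instance (predecessor : List (Option Int)) : Decidable (Pre_build_shortest_paths predecessor) := by
  unfold Pre_build_shortest_paths; infer_instance

def pvWitness_build_shortest_paths : List (Option Int) := [some 1, none, some 1]

def Spec_build_shortest_paths (predecessor : List (Option Int)) (out : List (List Int)) : Prop := out = build_shortest_paths_alt predecessor
instance (predecessor : List (Option Int)) (out : List (List Int)) : Decidable (Spec_build_shortest_paths predecessor out) := by unfold Spec_build_shortest_paths; infer_instance

-- ===== CLAIM (what is proved, stated in full; the proofs are below) =====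
def Claim_equal_build_shortest_paths : Prop := ∀ (predecessor : List (Option Int)), Dom_build_shortest_paths predecessor → Pre_build_shortest_paths predecessor → Spec_build_shortest_paths predecessor (build_shortest_paths predecessor)

-- ===== LEMMAS AND PROOFS =====
-- the chain from p, in discovery order, with fuel
def pvChain (predecessor : List (Option Int)) : Nat → Option Int → List Int
  | 0, _ => []
  | _ + 1, none => []
  | fuel + 1, some q => q :: pvChain predecessor fuel (pvStep predecessor q)

-- the path A assigns to node j (and, as we prove, B too)
def pvPathSpec (predecessor : List (Option Int)) (j : Int) : List Int :=
  (pvChain predecessor predecessor.length (pvStep predecessor j)).reverse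

theorem pvChain_none (predecessor : List (Option Int)) (f : Nat) :
    pvChain predecessor f none = [] := by cases f <;> rfl

theorem pvChainStep_none (predecessor : List (Option Int)) :
    pvChainStep predecessor none = none := rfl

theorem pvIter_none (predecessor : List (Option Int)) (k : Nat) :
    (pvChainStep predecessor)^[k] none = none := by
  induction k with
  | zero => rfl
  | succ n ih => rw [Function.iterate_succ_apply, pvChainStep_none, ih]

theorem pvIter_mono (predecessor : List (Option Int)) {k m : Nat} (h : k ≤ m)
    {x : Option Int} (hx : (pvChainStep predecessor)^[k] x = none) :
    (pvChainStep predecessor)^[m] x = none := by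
  obtain ⟨j, rfl⟩ := Nat.exists_eq_add_of_le h
  rw [Nat.add_comm, Function.iterate_add_apply, hx, pvIter_none]

-- A's while-loop accumulates the reversed chain
theorem pvAWhile_eq_chain (predecessor : List (Option Int)) :
    ∀ (fuel : Nat) (acc : List Int) (p : Option Int),
      pvAWhile predecessor fuel acc p = (pvChain predecessor fuel p).reverse ++ acc := by
  intro fuel
  induction fuel with
  | zero => intro acc p; rfl
  | succ n ih =>
    intro acc p
    cases p with
    | none => rfl
    | some q =>
      simp only [pvAWhile, pvChain, ih]
      simp

-- once a chain is dead within f steps, extra fuel does not change it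
theorem pvChain_stable (predecessor : List (Option Int)) :
    ∀ (f g : Nat) (p : Option Int), (pvChainStep predecessor)^[f] p = none → f ≤ g →
      pvChain predecessor g p = pvChain predecessor f p := by
  intro f
  induction f with
  | zero =>
    intro g p hp _
    simp only [Function.iterate_zero, id] at hp
    subst hp
    rw [pvChain_none, pvChain_none]
  | succ n ih =>
    intro g p hp hle
    obtain ⟨g', rfl⟩ : ∃ g', g = g' + 1 := ⟨g - 1, by omega⟩
    cases p with
    | none => rw [pvChain_none, pvChain_none]
    | some q =>
      rw [Function.iterate_succ_apply] at hp
      have hstep : pvChainStep predecessor (some q) = pvStep predecessor q := rfl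
      rw [hstep] at hp
      simp only [pvChain]
      rw [ih g' (pvStep predecessor q) hp (by omega)]

-- a memo is Good when every stored value is the specified path of its key
def pvGood (predecessor : List (Option Int)) (memo : PySem.Dict Int (List Int)) : Prop :=
  ∀ (j : Int) (r : List Int), memo.get? j = some r → r = pvPathSpec predecessor j

theorem pvGood_insert (predecessor : List (Option Int)) (memo : PySem.Dict Int (List Int))
    (k : Int) (v : List Int) (hm : pvGood predecessor memo)
    (hv : v = pvPathSpec predecessor k) :
    pvGood predecessor (memo.insert k v) := by
  intro j r hr
  by_cases hjk : j = k
  · subst hjk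
    rw [PySem.Dict.get?_insert_self] at hr
    cases hr
    exact hv
  · rw [PySem.Dict.get?_insert_of_ne memo v hjk] at hr
    exact hm j r hr

-- unfolding pvPathSpec one chain step (given the chain dies in time)
theorem pvPathSpec_step (predecessor : List (Option Int)) {i p : Int} {fuel : Nat}
    (hstep : pvStep predecessor i = some p)
    (hdead : (pvChainStep predecessor)^[fuel] (some p) = none)
    (hfuel : fuel ≤ predecessor.length) :
    pvPathSpec predecessor i = pvPathSpec predecessor p ++ [p] := by
  have hdeadN : (pvChainStep predecessor)^[predecessor.length] (some p) = none :=
    pvIter_mono predecessor hfuel hdead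
  obtain ⟨m, hm⟩ : ∃ m, predecessor.length = m + 1 := by
    rcases predecessor with _ | ⟨h, t⟩
    · exfalso
      simp [pvStep, PySem.List.pyGet?, PySem.List.pyIdx?] at hstep
    · exact ⟨t.length, rfl⟩
  have hdeadM : (pvChainStep predecessor)^[m] (pvStep predecessor p) = none := by
    have := hdeadN
    rw [hm, Function.iterate_succ_apply] at this
    exact this
  unfold pvPathSpec
  rw [hstep, hm]
  simp only [pvChain]
  rw [pvChain_stable predecessor m m (pvStep predecessor p) hdeadM (le_refl m)]
  -- need pvChain (m+1) (pvStep p) = pvChain m (pvStep p): stability again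
  have : pvChain predecessor (m + 1) (pvStep predecessor p)
       = pvChain predecessor m (pvStep predecessor p) :=
    pvChain_stable predecessor m (m + 1) (pvStep predecessor p) hdeadM (by omega)
  rw [this]
  simp

theorem pvUnwind_nil (memo : PySem.Dict Int (List Int)) : pvUnwind memo [] = memo := rfl

theorem pvUnwind_cons (memo : PySem.Dict Int (List Int)) (j p : Int) (l : List (Int × Int)) :
    pvUnwind memo ((j, p) :: l)
      = (pvUnwind memo l).insert j ((pvUnwind memo l).getD p [] ++ [p]) := by
  unfold pvUnwind
  rw [List.reverse_cons, List.foldl_append]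
  rfl

-- main memoization lemma: collecting from j then unwinding the collected links
-- yields a Good memo that stores j's specified path
theorem pvCollect_correct (predecessor : List (Option Int)) :
    ∀ (fuel : Nat) (j : Int) (memo : PySem.Dict Int (List Int)) (stack : List (Int × Int)),
      pvGood predecessor memo →
      (pvChainStep predecessor)^[fuel] (some j) = none →
      fuel ≤ predecessor.length →
      ∃ ext m1,
        pvCollect predecessor fuel memo stack j = (stack ++ ext, m1) ∧
        pvGood predecessor (pvUnwind m1 ext) ∧
        (pvUnwind m1 ext).get? j = some (pvPathSpec predecessor j) := by
  intro fuel
  induction fuel with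
  | zero =>
    intro j memo stack _ hdead _
    simp at hdead
  | succ n ih =>
    intro j memo stack hgood hdead hfuel
    rw [Function.iterate_succ_apply] at hdead
    have hstep0 : pvChainStep predecessor (some j) = pvStep predecessor j := rfl
    rw [hstep0] at hdead
    cases hhit : memo.get? j with
    | some r =>
      refine ⟨[], memo, ?_, ?_, ?_⟩
      · simp [pvCollect, hhit]
      · rw [pvUnwind_nil]; exact hgood
      · rw [pvUnwind_nil, hhit, hgood j r hhit]
    | none =>
      cases hstep : pvStep predecessor j with
      | none =>
        have hspec : pvPathSpec predecessor j = [] := by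
          unfold pvPathSpec; rw [hstep, pvChain_none]; rfl
        refine ⟨[], memo.insert j [], ?_, ?_, ?_⟩
        · simp [pvCollect, hhit, hstep]
        · rw [pvUnwind_nil]
          exact pvGood_insert predecessor memo j [] hgood hspec.symm
        · rw [pvUnwind_nil, PySem.Dict.get?_insert_self, hspec]
      | some p =>
        rw [hstep] at hdead
        obtain ⟨ext', m1, hcol, hgood', hget'⟩ :=
          ih p memo (stack ++ [(j, p)]) hgood hdead (by omega)
        have hgetD : (pvUnwind m1 ext').getD p [] = pvPathSpec predecessor p :=
          PySem.Dict.getD_of_get?_eq_some _ [] hget'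
        have hspec : pvPathSpec predecessor j = pvPathSpec predecessor p ++ [p] :=
          pvPathSpec_step predecessor hstep hdead (by omega)
        refine ⟨(j, p) :: ext', m1, ?_, ?_, ?_⟩
        · simp only [pvCollect, hhit, hstep]
          rw [hcol]
          simp
        · rw [pvUnwind_cons, hgetD]
          exact pvGood_insert predecessor _ j _ hgood' (by rw [hspec])
        · rw [pvUnwind_cons, hgetD, PySem.Dict.get?_insert_self, hspec]

-- the foldl over the indices produces the mapped paths, for any Good starting memo
theorem pvFoldl_paths (predecessor : List (Option Int))
    (hpre : ∀ i ∈ List.range predecessor.length,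
      (pvChainStep predecessor)^[predecessor.length] (some (i : Int)) = none) :
    ∀ (l : List Nat), (∀ i ∈ l, i ∈ List.range predecessor.length) →
    ∀ (acc : List (List Int)) (memo : PySem.Dict Int (List Int)), pvGood predecessor memo →
      (l.foldl (pvBStep predecessor) (acc, memo)).1
        = acc ++ l.map (fun i => pvPathSpec predecessor (i : Int)) := by
  intro l
  induction l with
  | nil => intro _ acc memo _; simp
  | cons x xs ih =>
    intro hmem acc memo hgood
    obtain ⟨ext, m1, hcol, hgood', hget⟩ := pvCollect_correct predecessor
      predecessor.length (x : Int) memo [] hgood (hpre x (hmem x (by simp))) (le_refl _)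
    rw [List.nil_append] at hcol
    simp only [List.foldl_cons, pvBStep, hcol]
    rw [ih (fun i hi => hmem i (by simp [hi])) _ _ hgood']
    simp [PySem.Dict.getD_of_get?_eq_some _ [] hget]

-- ===== VERDICT (by name: the statement is the Claim_ definition above) =====
theorem build_shortest_paths_spec : Claim_equal_build_shortest_paths := by
  intro predecessor _ hpre
  unfold Spec_build_shortest_paths build_shortest_paths build_shortest_paths_alt
  rw [pvFoldl_paths predecessor hpre.2 (List.range predecessor.length) (fun i hi => hi)
      [] PySem.Dict.empty (by intro j r hr; simp [PySem.Dict.get?_empty] at hr)]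
  simp only [List.nil_append]
  refine List.map_congr_left (fun i _ => ?_)
  rw [pvAWhile_eq_chain]
  simp [pvPathSpec]
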